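-- pv_equiv track=rewrite | github.com/BonnyWang/ECE455_CyberSecurity | FinalProject/checkReentrancy.py | detectCallInvocation
-- ===== SOURCE A (Python) =====
-- def detectCallInvocation(lines):
--     callLineIndexs = [];
--     containsCall = False;
--     for index,line in enumerate(lines):
--         if (".call." in line) or (".call{{" in line):
--
--             # check if the value is set to 0, otherwise it is still safe
--             if("value(0)" in line) or ("value: 0" in line):
--                 return False, callLineIndexs;
--             else:
--                 callLineIndexs.append(index);
--                 containsCall = True;
--
--     return containsCall, callLineIndexs;
-- ===== SOURCE B (Python) =====
-- def detectCallInvocation(lines):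
--     def is_call(line):
--         return (".call." in line) or (".call{{" in line)
--
--     def is_zero(line):
--         return ("value(0)" in line) or ("value: 0" in line)
--
--     # pass 1: find the first line that is both a call line and a value-0 line
--     cut = None
--     for index, line in enumerate(lines):
--         if is_call(line) and is_zero(line):
--             cut = index
--             break
--
--     # pass 2: collect call-line indices (before the cut, if any)
--     if cut is None:
--         idxs = [i for i, l in enumerate(lines) if is_call(l)]
--         return len(idxs) > 0, idxs
--     idxs = [i for i, l in enumerate(lines[:cut]) if is_call(l)]
--     return False, idxs
-- ===== Notes on version B (the rewrite author's own statement) =====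
-- stated objective: alternative
-- what changed: B separates the work into two passes: first find the index of the earliest line that is both a call line and a value-0 line (the cut), then collect call-line indices before the cut (or all of them) with a comprehension, instead of A's single interleaved loop with an accumulator, a flag and an early return.
import Mathlib
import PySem

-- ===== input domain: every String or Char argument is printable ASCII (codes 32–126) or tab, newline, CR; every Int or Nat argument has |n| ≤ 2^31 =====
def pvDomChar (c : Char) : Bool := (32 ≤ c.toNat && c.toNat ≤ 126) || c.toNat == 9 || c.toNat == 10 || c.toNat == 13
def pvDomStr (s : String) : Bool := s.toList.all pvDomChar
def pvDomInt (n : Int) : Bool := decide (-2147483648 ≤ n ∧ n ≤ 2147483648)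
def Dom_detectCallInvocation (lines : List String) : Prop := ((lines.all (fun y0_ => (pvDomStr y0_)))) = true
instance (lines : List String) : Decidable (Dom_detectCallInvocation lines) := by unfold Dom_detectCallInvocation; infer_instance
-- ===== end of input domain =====

-- B replaces A's single interleaved loop (accumulator + flag + early return) by two passes:
-- find the cut (first call line that is also value-0), then collect call indices before it.

-- ===== PORT A =====
-- the for loop with early return, as structural recursion over the same state
def detectA_go : List String → Int → Bool → List Int → Bool × List Int
  | [], _, containsCall, acc => (containsCall, acc)
  | line :: rest, index, containsCall, acc =>
    if PySem.Str.isIn ".call." line || PySem.Str.isIn ".call{{" line then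
      if PySem.Str.isIn "value(0)" line || PySem.Str.isIn "value: 0" line then
        (false, acc)
      else detectA_go rest (index + 1) true (acc ++ [index])
    else detectA_go rest (index + 1) containsCall acc

def detectCallInvocation (lines : List String) : Bool × List Int :=
  detectA_go lines 0 false []

-- ===== PORT B =====
def bIsCall (line : String) : Bool :=
  PySem.Str.isIn ".call." line || PySem.Str.isIn ".call{{" line

def bIsZero (line : String) : Bool :=
  PySem.Str.isIn "value(0)" line || PySem.Str.isIn "value: 0" line

-- pass 1: index of the first line with is_call && is_zero (the enumerate index is
-- the offset from the start, a nonnegative count, hence Nat here)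
def bCut : List String → Option Nat
  | [] => none
  | line :: rest =>
    if bIsCall line && bIsZero line then some 0
    else (bCut rest).map (· + 1)

-- pass 2: the comprehension [i for i, l in enumerate(...) if is_call(l)]
def bCollect : List String → Int → List Int
  | [], _ => []
  | line :: rest, i =>
    if bIsCall line then i :: bCollect rest (i + 1) else bCollect rest (i + 1)

def detectCallInvocation_alt (lines : List String) : Bool × List Int :=
  match bCut lines with
  | none =>
    let idxs := bCollect lines 0
    (decide (idxs.length > 0), idxs)
  | some cut =>
    -- lines[:cut] with 0 ≤ cut ≤ len(lines): exactly List.take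
    (false, bCollect (lines.take cut) 0)

-- ===== PRECONDITION & SPEC =====
def Spec_detectCallInvocation (lines : List String) (out : Bool × List Int) : Prop := out = detectCallInvocation_alt lines
instance (lines : List String) (out : Bool × List Int) : Decidable (Spec_detectCallInvocation lines out) := by unfold Spec_detectCallInvocation; infer_instance

-- ===== CLAIM (what is proved, stated in full; the proofs are below) =====
def Claim_equal_detectCallInvocation : Prop := ∀ (lines : List String), Dom_detectCallInvocation lines → Spec_detectCallInvocation lines (detectCallInvocation lines)

-- ===== LEMMAS AND PROOFS =====

theorem bIsCall_eq (line : String) :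
    (PySem.Str.isIn ".call." line || PySem.Str.isIn ".call{{" line) = bIsCall line := rfl

theorem bIsZero_eq (line : String) :
    (PySem.Str.isIn "value(0)" line || PySem.Str.isIn "value: 0" line) = bIsZero line := rfl

theorem detectA_go_eq (lines : List String) :
    ∀ (i : Int) (c : Bool) (acc : List Int),
    detectA_go lines i c acc =
      match bCut lines with
      | some cut => (false, acc ++ bCollect (lines.take cut) i)
      | none => (c || decide ((bCollect lines i).length > 0), acc ++ bCollect lines i) := by
  induction lines with
  | nil => intro i c acc; simp [detectA_go, bCut, bCollect]
  | cons line rest ih =>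
    intro i c acc
    cases hcall : bIsCall line with
    | false =>
      simp only [detectA_go, bCut, bIsCall_eq, bIsZero_eq, hcall, Bool.false_eq_true,
        if_false]
      rw [ih]
      cases hrest : bCut rest with
      | some cut =>
        simp [bCollect, hcall, List.take_succ_cons]
      | none =>
        simp [bCollect, hcall]
    | true =>
      cases hzero : bIsZero line with
      | true =>
        simp only [detectA_go, bCut, bIsCall_eq, bIsZero_eq, hcall, hzero, if_true]
        simp [bCollect]
      | false =>
        simp only [detectA_go, bCut, bIsCall_eq, bIsZero_eq, hcall, hzero,
          Bool.false_eq_true, if_false, if_true]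
        rw [ih]
        cases hrest : bCut rest with
        | some cut =>
          simp [bCollect, hcall, List.take_succ_cons]
        | none =>
          simp [bCollect, hcall]

-- ===== VERDICT (by name: the statement is the Claim_ definition above) =====
theorem detectCallInvocation_spec : Claim_equal_detectCallInvocation := by
  intro lines _
  unfold Spec_detectCallInvocation detectCallInvocation detectCallInvocation_alt
  rw [detectA_go_eq]
  cases h : bCut lines <;> simp
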